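-- pv_equiv track=rewrite | github.com/riboseqorg/RiboSeqOrg-DataPortal | riboseqorg/main/string2query.py | str_to_eq
-- ===== SOURCE A (Python) =====
-- def extract_value_field(input_string: str) -> tuple:
--     """
--     Extracts the value and field from a given input string.
--
--     The function takes a string as input and extracts the value and field.
--     The field is enclosed in square brackets, e.g., "Malawi[country]".
--
--     Args:
--         input_string (str): The input string containing a value and an optional field.
--
--     Returns:
--         tuple: A tuple containing the extracted value and field. If field is not provided, "all" is used.
--                If the value is not present, returns None.
--
--     Examples:
--         >>> extract_value_field("Malawi[country]")
--         ("Malawi", "country")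
--
--         >>> extract_value_field("Malawi")
--         ("Malawi", "all")
--     """
--     value, field = "", ""
--     temp_field = False
--
--     for char in input_string:
--         if char == "[":
--             temp_field = True
--             continue
--         if temp_field:
--             if char == "]":
--                 continue
--             field += char
--         else:
--             value += char
--
--     if not value.strip():
--         return None, None
--
--     if not field.strip():
--         field = "all"
--
--     return value.strip(), field.strip()
--
-- def str_to_eq(input_string):
--     """
--     Converts a given string to a mathematical equation and operand dictionary.
--
--     Args:
--         input_string (str): Input string with logical operators and operands.
--
--     Returns:
--         tuple: A tuple containing the mathematical equation and operand dictionary.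
--
--     Example:
--         >>> str_to_eq("~amplicons | (South Africa[country] & cancer[disease]) | (Malawi[country] & Illumina[platform])")
--         ('A+(B*C)+(D*E)', {'A': ('~amplicons', 'all'), 'B': ('South Africa', 'country'),
--                            'C': ('cancer', 'disease'), 'D': ('Malawi', 'country'),
--                            'E': ('Illumina', 'platform')})
--     """
--     init_chr = 65  # "A"
--     qvalue = ""
--     value_dict = {}
--     my_equation = ""
--     for character in input_string:
--         if character in "(&|)":
--             if qvalue:
--                 vtype = extract_value_field(qvalue)
--                 if vtype[0]:
--                     my_equation += chr(init_chr)
--                     value_dict[chr(init_chr)] = vtype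
--                     init_chr += 1
--
--                 qvalue = ""
--             if character == "&":
--                 my_equation += "*"
--             elif character == "|":
--                 my_equation += "+"
--             else:
--                 my_equation += character
--         else:
--             qvalue += character
--
--     if qvalue:
--         my_equation += chr(init_chr)
--         value_dict[chr(init_chr)] = extract_value_field(qvalue)
--
--     return my_equation, value_dict
-- ===== SOURCE B (Python) =====
-- import re
--
-- def _split_vf(token):
--     """Same contract as extract_value_field: value is the stripped text before the
--     first '[', field is the bracketed remainder (brackets removed) or 'all'."""
--     head, _, rest = token.partition('[')
--     value = head.strip()
--     if not value:
--         return None, None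
--     field = rest.replace('[', '').replace(']', '').strip()
--     return value, field or 'all'
--
-- def str_to_eq(input_string):
--     ops = {'&': '*', '|': '+', '(': '(', ')': ')'}
--     my_equation = ""
--     value_dict = {}
--     letter = 65
--     for tok in re.split(r'([(&|)])', input_string):
--         if tok in ops:
--             my_equation += ops[tok]
--         elif tok:
--             v, f = _split_vf(tok)
--             if v:
--                 my_equation += chr(letter)
--                 value_dict[chr(letter)] = (v, f)
--                 letter += 1
--     return my_equation, value_dict
-- ===== Notes on version B (the rewrite author's own statement) =====
-- stated objective: faster
-- what changed: B tokenizes the whole string once with re.split (C-level scan) and folds over the alternating text/operator tokens, gating every text token uniformly on a non-empty extracted value, instead of A's per-character Python buffer loop with a separate unconditional flush of the trailing buffer; value/field extraction uses partition/replace instead of A's stateful character loop.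
-- outside the precondition, e.g. on str_to_eq('['): A returns ('A', {'A': (None, None)}), B returns ('', {})
import Mathlib
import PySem

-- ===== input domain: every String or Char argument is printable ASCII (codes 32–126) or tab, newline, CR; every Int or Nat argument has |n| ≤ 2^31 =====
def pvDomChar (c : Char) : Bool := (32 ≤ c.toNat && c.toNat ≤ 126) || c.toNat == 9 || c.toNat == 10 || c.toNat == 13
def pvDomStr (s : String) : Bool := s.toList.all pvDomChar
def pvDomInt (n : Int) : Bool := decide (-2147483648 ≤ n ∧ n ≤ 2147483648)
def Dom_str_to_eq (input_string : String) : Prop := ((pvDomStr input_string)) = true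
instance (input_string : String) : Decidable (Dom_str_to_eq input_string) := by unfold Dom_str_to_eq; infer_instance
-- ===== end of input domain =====

-- B tokenizes once with re.split and folds over the tokens instead of A's per-character buffer loop;
-- measurably faster by constant factor (C-level scan). Return-value equivalence only (no mutation in either).

-- ===== PORT A =====
-- extract_value_field's character loop, state (value, field, temp_field); value/field grow at the right
def evfLoop : List Char → List Char → List Char → Bool → (List Char × List Char)
  | [], v, f, _ => (v, f)
  | c :: rest, v, f, tf =>
    if c = '[' then evfLoop rest v f true
    else if tf then
      if c = ']' then evfLoop rest v f tf
      else evfLoop rest v (f ++ [c]) tf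
    else evfLoop rest (v ++ [c]) f tf

-- extract_value_field: none = Python's (None, None)
def extract_value_field (cs : List Char) : Option (String × String) :=
  let vf := evfLoop cs [] [] false
  if PySem.Chars.strip vf.1 = [] then none
  else
    let field := if PySem.Chars.strip vf.2 = [] then ['a', 'l', 'l'] else vf.2
    some (String.ofList (PySem.Chars.strip vf.1), String.ofList (PySem.Chars.strip field))

def opA (c : Char) : Bool := c = '(' || c = '&' || c = '|' || c = ')'

-- str_to_eq's loop, state (init_chr, qvalue, value_dict, my_equation); keys chr(init_chr) are always
-- fresh (init_chr only increases), so the Python dict insertion is exactly a list append.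
def strToEqLoopA : List Char → Nat → List Char → List (String × String × String) → List Char →
    String × (List (String × String × String))
  | [], n, q, d, e =>
    if q ≠ [] then
      match extract_value_field q with
      | some (v, f) =>
          (String.ofList (e ++ [Char.ofNat n]), d ++ [(String.ofList [Char.ofNat n], v, f)])
      | none =>
          -- here Python stores (None, None), which the declared type cannot hold (outside Pre_)
          (String.ofList (e ++ [Char.ofNat n]), d ++ [(String.ofList [Char.ofNat n], "", "")])
    else (String.ofList e, d)
  | c :: rest, n, q, d, e =>
    if opA c then
      let st :=
        if q ≠ [] then
          match extract_value_field q with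
          | some (v, f) => (n + 1, d ++ [(String.ofList [Char.ofNat n], v, f)], e ++ [Char.ofNat n])
          | none => (n, d, e)
        else (n, d, e)
      let sym : Char := if c = '&' then '*' else if c = '|' then '+' else c
      strToEqLoopA rest st.1 [] st.2.1 (st.2.2 ++ [sym])
    else strToEqLoopA rest n (q ++ [c]) d e

def str_to_eq (input_string : String) : String × (List (String × String × String)) :=
  strToEqLoopA input_string.toList 65 [] [] []

-- ===== PORT B =====
def opB (c : Char) : Bool := c = '(' || c = '&' || c = '|' || c = ')'

-- re.split(r'([(&|)])', s): text segments (possibly empty) alternating with one-char operator tokens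
def tokenizeB : List Char → List Char → List (List Char)
  | [], acc => [acc]
  | c :: rest, acc =>
    if opB c then acc :: [c] :: tokenizeB rest []
    else tokenizeB rest (acc ++ [c])

-- _split_vf: partition at the first '['; .replace('[','').replace(']','') on 1-char needles is exactly a filter
def splitVF (tok : List Char) : Option (String × String) :=
  let head := tok.takeWhile (fun c => !(c = '['))
  let rest := (tok.dropWhile (fun c => !(c = '['))).drop 1
  let value := PySem.Chars.strip head
  if value = [] then none
  else
    let field := PySem.Chars.strip (rest.filter (fun c => !(c = '[' || c = ']')))
    some (String.ofList value, String.ofList (if field = [] then ['a', 'l', 'l'] else field))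

def foldToksB : List (List Char) → Nat → List (String × String × String) → List Char →
    String × (List (String × String × String))
  | [], _, d, e => (String.ofList e, d)
  | t :: rest, n, d, e =>
    if t = ['&'] then foldToksB rest n d (e ++ ['*'])
    else if t = ['|'] then foldToksB rest n d (e ++ ['+'])
    else if t = ['('] then foldToksB rest n d (e ++ ['('])
    else if t = [')'] then foldToksB rest n d (e ++ [')'])
    else if t = [] then foldToksB rest n d e
    else
      match splitVF t with
      | some (v, f) => foldToksB rest (n + 1) (d ++ [(String.ofList [Char.ofNat n], v, f)]) (e ++ [Char.ofNat n])
      | none => foldToksB rest n d e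

def str_to_eq_alt (input_string : String) : String × (List (String × String × String)) :=
  foldToksB (tokenizeB input_string.toList []) 65 [] []

-- ===== PRECONDITION & SPEC =====
-- Pre_ excludes inputs whose trailing text segment (after the last of '(', '&', '|', ')') is non-empty
-- yet has an empty stripped value before its first '[': there A stores a Python None pair in the result
-- dict — not a value of the declared (String × String) type — while B omits the entry.
def Pre_str_to_eq (input_string : String) : Prop :=
  (input_string.toList.reverse.takeWhile (fun c => !opA c)).reverse = [] ∨
  PySem.Chars.strip
    (((input_string.toList.reverse.takeWhile (fun c => !opA c)).reverse).takeWhile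
      (fun c => !(c = '['))) ≠ []
instance (input_string : String) : Decidable (Pre_str_to_eq input_string) := by
  unfold Pre_str_to_eq; infer_instance

def pvWitness_str_to_eq : String := "~amp | (Malawi[country] & x)"

def Spec_str_to_eq (input_string : String) (out : String × (List (String × String × String))) : Prop := out = str_to_eq_alt input_string
instance (input_string : String) (out : String × (List (String × String × String))) : Decidable (Spec_str_to_eq input_string out) := by unfold Spec_str_to_eq; infer_instance

-- ===== CLAIM (what is proved, stated in full; the proofs are below) =====
def Claim_equal_str_to_eq : Prop := ∀ (input_string : String), Dom_str_to_eq input_string → Pre_str_to_eq input_string → Spec_str_to_eq input_string (str_to_eq input_string)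

-- ===== LEMMAS AND PROOFS =====

-- the text segment after the last operator character, as A's buffer computes it
def lastSegL : List Char → List Char → List Char
  | [], q => q
  | c :: rest, q => if opA c then lastSegL rest [] else lastSegL rest (q ++ [c])

theorem takeWhile_append_stop {p : Char → Bool} {xs : List Char} (ys : List Char)
    (h : ¬ xs.all p) : (xs ++ ys).takeWhile p = xs.takeWhile p := by
  rw [List.takeWhile_append]
  split
  · next hlen =>
    exfalso
    have heq : xs.takeWhile p = xs := (List.takeWhile_prefix p).eq_of_length hlen
    exact h (by simpa [List.all_eq_true] using List.takeWhile_eq_self_iff.mp heq)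
  · rfl

theorem takeWhile_append_go {p : Char → Bool} {xs : List Char} (ys : List Char)
    (h : xs.all p) : (xs ++ ys).takeWhile p = xs ++ ys.takeWhile p := by
  rw [List.takeWhile_append]
  have heq : xs.takeWhile p = xs :=
    List.takeWhile_eq_self_iff.mpr (by simpa [List.all_eq_true] using h)
  simp [heq]

theorem evfLoop_true (cs : List Char) : ∀ v f, evfLoop cs v f true
    = (v, f ++ cs.filter (fun c => !(c = '[' || c = ']'))) := by
  induction cs with
  | nil => intro v f; simp [evfLoop]
  | cons c rest ih =>
    intro v f
    by_cases h1 : c = '['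
    · simp [evfLoop, h1, ih]
    · by_cases h2 : c = ']'
      · simp only [evfLoop, if_neg h1, if_pos h2, if_pos rfl, ih]
        simp [h2]
      · simp [evfLoop, h1, h2, ih]

theorem evfLoop_false (cs : List Char) : ∀ v f, evfLoop cs v f false
    = (v ++ cs.takeWhile (fun c => !(c = '[')),
       f ++ ((cs.dropWhile (fun c => !(c = '['))).drop 1).filter (fun c => !(c = '[' || c = ']'))) := by
  induction cs with
  | nil => intro v f; simp [evfLoop]
  | cons c rest ih =>
    intro v f
    by_cases h1 : c = '['
    · simp [evfLoop, h1, evfLoop_true]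
    · simp [evfLoop, h1, ih]

theorem strip_all : PySem.Chars.strip ['a', 'l', 'l'] = ['a', 'l', 'l'] := by decide

-- A strips the field after the 'all' default, B before; same result
theorem strip_field (f : List Char) :
    PySem.Chars.strip (if PySem.Chars.strip f = [] then ['a', 'l', 'l'] else f)
      = (if PySem.Chars.strip f = [] then ['a', 'l', 'l'] else PySem.Chars.strip f) := by
  split
  · exact strip_all
  · rfl

theorem splitVF_eq_none_iff (t : List Char) : splitVF t = none
    ↔ PySem.Chars.strip (t.takeWhile (fun c => !(c = '['))) = [] := by
  simp only [splitVF]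
  split <;> simp_all

theorem extract_eq_splitVF (cs : List Char) : extract_value_field cs = splitVF cs := by
  have h := evfLoop_false cs [] []
  simp only [List.nil_append] at h
  simp only [extract_value_field, splitVF, h, strip_field]

theorem all_not_op_of_not_any {cs : List Char} (h : ¬ cs.any opA) :
    cs.reverse.all (fun c => !opA c) := by
  simp only [List.all_reverse, List.all_eq_true]
  intro x hx
  simp only [List.any_eq_true] at h
  push_neg at h
  simp [h x hx]

theorem not_all_not_op_of_any {cs : List Char} (h : cs.any opA) :
    ¬ (cs.reverse.all (fun c => !opA c) = true) := by
  simp only [List.all_reverse, List.all_eq_true]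
  simp only [List.any_eq_true] at h
  obtain ⟨x, hx, hox⟩ := h
  intro hall
  have := hall x hx
  simp [hox] at this

theorem lastSegL_eq (cs : List Char) : ∀ q, lastSegL cs q
    = if cs.any opA then (cs.reverse.takeWhile (fun c => !opA c)).reverse else q ++ cs := by
  induction cs with
  | nil => intro q; simp [lastSegL]
  | cons c rest ih =>
    intro q
    by_cases hc : opA c
    · rw [lastSegL, if_pos hc, ih []]
      rw [List.any_cons, if_pos (show (opA c || rest.any opA) = true by rw [hc, Bool.true_or]),
        List.reverse_cons]
      by_cases hr : rest.any opA
      · rw [if_pos hr, takeWhile_append_stop _ (not_all_not_op_of_any hr)]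
      · rw [if_neg hr, takeWhile_append_go _ (all_not_op_of_not_any hr)]
        simp [hc]
    · have hcf : opA c = false := by simpa using hc
      rw [lastSegL, if_neg (by simp [hc]), ih (q ++ [c])]
      rw [List.any_cons, hcf, Bool.false_or, List.reverse_cons]
      by_cases hr : rest.any opA
      · rw [if_pos hr, if_pos hr, takeWhile_append_stop _ (not_all_not_op_of_any hr)]
      · rw [if_neg hr, if_neg hr]
        simp

theorem foldToksB_nilTok (rest : List (List Char)) (n : Nat)
    (d : List (String × String × String)) (e : List Char) :
    foldToksB ([] :: rest) n d e = foldToksB rest n d e := by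
  simp [foldToksB]

theorem foldToksB_op {c : Char} (hc : opA c = true) (rest : List (List Char)) (n : Nat)
    (d : List (String × String × String)) (e : List Char) :
    foldToksB ([c] :: rest) n d e
      = foldToksB rest n d (e ++ [if c = '&' then '*' else if c = '|' then '+' else c]) := by
  simp only [opA, Bool.or_eq_true, decide_eq_true_eq] at hc
  rcases hc with ((h | h) | h) | h <;> subst h <;> simp [foldToksB]

theorem foldToksB_text_ne {t : List Char} (ht : ∀ c ∈ t, ¬ opA c) (hne : t ≠ [])
    (rest : List (List Char)) (n : Nat) (d : List (String × String × String)) (e : List Char) :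
    foldToksB (t :: rest) n d e
      = match splitVF t with
        | some (v, f) =>
            foldToksB rest (n + 1) (d ++ [(String.ofList [Char.ofNat n], v, f)]) (e ++ [Char.ofNat n])
        | none => foldToksB rest n d e := by
  have hs : ∀ s : Char, opA s → t ≠ [s] := by
    intro s hs h
    subst h
    exact (ht s (by simp)) hs
  have h1 := hs '&' (by decide); have h2 := hs '|' (by decide)
  have h3 := hs '(' (by decide); have h4 := hs ')' (by decide)
  simp only [foldToksB, h1, h2, h3, h4, hne, if_false]

theorem foldToksB_text_some {t : List Char} (ht : ∀ c ∈ t, ¬ opA c) (hne : t ≠ [])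
    {v f : String} (hvf : splitVF t = some (v, f))
    (rest : List (List Char)) (n : Nat) (d : List (String × String × String)) (e : List Char) :
    foldToksB (t :: rest) n d e
      = foldToksB rest (n + 1) (d ++ [(String.ofList [Char.ofNat n], v, f)]) (e ++ [Char.ofNat n]) := by
  rw [foldToksB_text_ne ht hne, hvf]

theorem foldToksB_text_none {t : List Char} (ht : ∀ c ∈ t, ¬ opA c) (hne : t ≠ [])
    (hvf : splitVF t = none)
    (rest : List (List Char)) (n : Nat) (d : List (String × String × String)) (e : List Char) :
    foldToksB (t :: rest) n d e = foldToksB rest n d e := by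
  rw [foldToksB_text_ne ht hne, hvf]

-- main bridge: A's buffered loop from buffer q = B's fold over the tokens of (q, cs),
-- provided q holds no operator chars and the final text segment, if non-empty, has a value.
theorem loop_eq (cs : List Char) : ∀ q n d e,
    (∀ c ∈ q, ¬ opA c) →
    (lastSegL cs q = [] ∨ splitVF (lastSegL cs q) ≠ none) →
    strToEqLoopA cs n q d e = foldToksB (tokenizeB cs q) n d e := by
  induction cs with
  | nil =>
    intro q n d e hq hlast
    simp only [lastSegL] at hlast
    by_cases hqe : q = []
    · simp [hqe, strToEqLoopA, tokenizeB, foldToksB]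
    · have hs : splitVF q ≠ none := by
        rcases hlast with h | h
        · exact absurd h hqe
        · exact h
      cases hvf : splitVF q with
      | none => exact absurd hvf hs
      | some vf =>
        obtain ⟨v, f⟩ := vf
        rw [show tokenizeB [] q = [q] from rfl, foldToksB_text_some hq hqe hvf]
        simp only [strToEqLoopA, hqe, ne_eq, not_false_eq_true, if_true, extract_eq_splitVF, hvf,
          foldToksB]
  | cons c rest ih =>
    intro q n d e hq hlast
    by_cases hc : opA c
    · have hlast' : lastSegL rest [] = [] ∨ splitVF (lastSegL rest []) ≠ none := by
        simpa [lastSegL, hc] using hlast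
      have hcb : opB c = true := hc
      rw [show tokenizeB (c :: rest) q = if opB c then q :: [c] :: tokenizeB rest []
            else tokenizeB rest (q ++ [c]) from rfl, if_pos hcb]
      by_cases hqe : q = []
      · subst hqe
        rw [foldToksB_nilTok, foldToksB_op hc]
        simp only [strToEqLoopA, hc, if_true, ne_eq, not_true_eq_false, if_false]
        exact ih [] n d _ (by simp) hlast'
      · cases hvf : splitVF q with
        | none =>
          rw [foldToksB_text_none hq hqe hvf, foldToksB_op hc]
          simp only [strToEqLoopA, hc, if_true, hqe, ne_eq, not_false_eq_true,
            extract_eq_splitVF, hvf]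
          exact ih [] n d _ (by simp) hlast'
        | some vf =>
          obtain ⟨v, f⟩ := vf
          rw [foldToksB_text_some hq hqe hvf, foldToksB_op hc]
          simp only [strToEqLoopA, hc, if_true, hqe, ne_eq, not_false_eq_true,
            extract_eq_splitVF, hvf]
          exact ih [] (n + 1) _ _ (by simp) hlast'
    · have hlast' : lastSegL rest (q ++ [c]) = [] ∨ splitVF (lastSegL rest (q ++ [c])) ≠ none := by
        simpa [lastSegL, hc] using hlast
      have hcb : ¬ (opB c = true) := hc
      rw [show tokenizeB (c :: rest) q = if opB c then q :: [c] :: tokenizeB rest []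
            else tokenizeB rest (q ++ [c]) from rfl, if_neg hcb]
      simp only [strToEqLoopA, hc, Bool.false_eq_true, if_false]
      refine ih (q ++ [c]) n d e ?_ hlast'
      intro x hx
      rcases List.mem_append.mp hx with h | h
      · exact hq x h
      · simp only [List.mem_singleton] at h; subst h; exact hc

-- ===== VERDICT (by name: the statement is the Claim_ definition above) =====
theorem str_to_eq_spec : Claim_equal_str_to_eq := by
  intro s _ hpre
  unfold Spec_str_to_eq str_to_eq str_to_eq_alt
  refine (loop_eq s.toList [] 65 [] [] (by simp) ?_)
  have hls : lastSegL s.toList [] = (s.toList.reverse.takeWhile (fun c => !opA c)).reverse := by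
    rw [lastSegL_eq]
    by_cases h : s.toList.any opA
    · simp [h]
    · have hall := all_not_op_of_not_any h
      rw [if_neg h, List.takeWhile_eq_self_iff.mpr
        (by simpa [List.all_eq_true] using hall), List.reverse_reverse, List.nil_append]
  rw [hls]
  unfold Pre_str_to_eq at hpre
  rcases hpre with h | h
  · left; exact h
  · right
    intro hnone
    exact h ((splitVF_eq_none_iff _).mp hnone)
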